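-- pv_equiv track=rewrite | github.com/RushabhShah20/leetcode-solutions | easy/Equal Score Substrings/Python/main.py | scoreBalance
-- ===== SOURCE A (Python) =====
-- def scoreBalance(s: str) -> bool:
--     prefix: List[int] = [0] * len(s)
--     prefix[0] = (ord(s[0]) - ord("a")) + 1
--     for i in range(1, len(s)):
--         prefix[i] = prefix[i - 1] + (ord(s[i]) - ord("a") + 1)
--     suffix: List[int] = [0] * len(s)
--     suffix[len(s) - 1] = (ord(s[len(s) - 1]) - ord("a")) + 1
--     for i in range(len(s) - 2, -1, -1):
--         suffix[i] = suffix[i + 1] + (ord(s[i]) - ord("a") + 1)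
--     for i in range(0, len(s) - 1):
--         if prefix[i] == suffix[i + 1]:
--             return True
--     return False
-- ===== SOURCE B (Python) =====
-- def scoreBalance(s: str) -> bool:
--     total = sum(ord(c) - 96 for c in s)
--     prefix = 0
--     for c in s[:-1]:
--         prefix += ord(c) - 96
--         if 2 * prefix == total:
--             return True
--     return False
-- ===== Notes on version B (the rewrite author's own statement) =====
-- stated objective: simpler
-- what changed: Replaces the two O(n) prefix/suffix arrays and three index loops with a single pass keeping one running prefix sum compared against twice the precomputed total (no list allocation/indexing); Pre_ excludes only the empty string, on which A raises IndexError.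
import Mathlib
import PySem

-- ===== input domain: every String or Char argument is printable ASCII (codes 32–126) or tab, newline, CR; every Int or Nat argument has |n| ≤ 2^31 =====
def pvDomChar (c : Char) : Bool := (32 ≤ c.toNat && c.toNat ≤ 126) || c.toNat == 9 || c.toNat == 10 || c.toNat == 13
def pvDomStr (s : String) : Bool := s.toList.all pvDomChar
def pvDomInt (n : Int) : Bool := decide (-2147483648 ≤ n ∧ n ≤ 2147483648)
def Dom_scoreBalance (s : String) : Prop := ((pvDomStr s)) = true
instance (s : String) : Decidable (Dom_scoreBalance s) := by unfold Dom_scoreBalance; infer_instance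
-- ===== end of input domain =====

-- B replaces A's two prefix/suffix arrays and three loops by one pass with a running prefix
-- sum compared against the precomputed total (simpler, O(1) extra space).


-- ===== PORT A =====
-- (ord(c) - ord("a")) + 1
def pvScoreA (c : Char) : Int := ((c.toNat : Int) - 97) + 1

def scoreBalance (s : String) : Bool :=
  let cs := s.toList
  let n : Int := cs.length
  -- prefix = [0]*len(s); prefix[0] = score(s[0]); for i in range(1, len(s)): …
  let pref0 := PySem.List.pySetD (List.replicate cs.length (0 : Int)) 0
      (pvScoreA (PySem.List.pyGetD cs 0 'a'))
  let pref := (PySem.List.pyRange 1 n 1).foldl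
      (fun p i => PySem.List.pySetD p i
        (PySem.List.pyGetD p (i - 1) 0 + pvScoreA (PySem.List.pyGetD cs i 'a'))) pref0
  -- suffix = [0]*len(s); suffix[len(s)-1] = score(s[-1]); for i in range(len(s)-2, -1, -1): …
  let suf0 := PySem.List.pySetD (List.replicate cs.length (0 : Int)) (n - 1)
      (pvScoreA (PySem.List.pyGetD cs (n - 1) 'a'))
  let suf := (PySem.List.pyRange (n - 2) (-1) (-1)).foldl
      (fun q i => PySem.List.pySetD q i
        (PySem.List.pyGetD q (i + 1) 0 + pvScoreA (PySem.List.pyGetD cs i 'a'))) suf0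
  -- for i in range(0, len(s)-1): if prefix[i] == suffix[i+1]: return True
  (PySem.List.pyRange 0 (n - 1) 1).any
    (fun i => PySem.List.pyGetD pref i 0 == PySem.List.pyGetD suf (i + 1) 0)

-- ===== PORT B =====
-- ord(c) - 96
def pvScoreB (c : Char) : Int := (c.toNat : Int) - 96

-- for c in s[:-1]: prefix += ord(c) - 96; if 2*prefix == total: return True
def scoreBalanceAltGo (total : Int) (pre : Int) : List Char → Bool
  | [] => false
  | c :: rest =>
      let p := pre + pvScoreB c
      if 2 * p == total then true else scoreBalanceAltGo total p rest

def scoreBalance_alt (s : String) : Bool :=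
  let cs := s.toList
  let total := (cs.map pvScoreB).sum
  scoreBalanceAltGo total 0 (PySem.List.slice cs none (some (-1)))

-- ===== PRECONDITION & SPEC =====
-- A assigns prefix[0], which raises IndexError on the empty string; that is the only input A raises on.
def Pre_scoreBalance (s : String) : Prop := s ≠ ""
instance (s : String) : Decidable (Pre_scoreBalance s) := by unfold Pre_scoreBalance; infer_instance
def pvWitness_scoreBalance : String := "abab"

def Spec_scoreBalance (s : String) (out : Bool) : Prop := out = scoreBalance_alt s
instance (s : String) (out : Bool) : Decidable (Spec_scoreBalance s out) := by unfold Spec_scoreBalance; infer_instance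

-- ===== CLAIM (what is proved, stated in full; the proofs are below) =====
def Claim_equal_scoreBalance : Prop := ∀ (s : String), Dom_scoreBalance s → Pre_scoreBalance s → Spec_scoreBalance s (scoreBalance s)

-- ===== LEMMAS AND PROOFS =====

-- score list and its prefix / suffix partial sums
def pvG (cs : List Char) : List Int := cs.map pvScoreA
def pvPS (cs : List Char) (k : Nat) : Int := ((pvG cs).take k).sum
def pvSS (cs : List Char) (k : Nat) : Int := ((pvG cs).drop k).sum

lemma pvScoreB_eq_A : pvScoreB = pvScoreA := by
  funext c; simp [pvScoreA, pvScoreB]; ring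

lemma pvPS_add_SS (cs : List Char) (k : Nat) : pvPS cs k + pvSS cs k = (pvG cs).sum := by
  simp [pvPS, pvSS, ← List.sum_append]

lemma pvPS_succ (cs : List Char) (k : Nat) (hk : k < cs.length) :
    pvPS cs (k + 1) = pvPS cs k + pvScoreA cs[k] := by
  have h : k < (List.map pvScoreA cs).length := by simpa using hk
  simp only [pvPS, pvG]
  rw [List.sum_take_succ _ _ h]
  simp

lemma pvSS_succ (cs : List Char) (k : Nat) (hk : k < cs.length) :
    pvSS cs k = pvScoreA cs[k] + pvSS cs (k + 1) := by
  have h : k < (List.map pvScoreA cs).length := by simpa using hk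
  simp only [pvSS, pvG]
  rw [List.drop_eq_getElem_cons h, List.sum_cons]
  simp

-- getD after set, the only array fact both loop invariants need
lemma pvGetDSet (p : List Int) (i j : Nat) (v : Int) (hi : i < p.length) :
    (p.set i v).getD j 0 = if j = i then v else p.getD j 0 := by
  rcases eq_or_ne j i with h | h
  · subst h; simp [List.getD_eq_getElem?_getD, hi]
  · simp [List.getD_eq_getElem?_getD, h.symm, h]

-- the prefix-array loop invariant
lemma prefix_inv (cs : List Char) :
    ∀ (fuel m : Nat), cs.length - m ≤ fuel → 1 ≤ m → m ≤ cs.length →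
    ∀ (p : List Int), p.length = cs.length →
    (∀ j, j < m → p.getD j 0 = pvPS cs (j + 1)) →
    (((PySem.List.pyRange (m : Int) (cs.length : Int) 1).foldl
      (fun p i => PySem.List.pySetD p i
        (PySem.List.pyGetD p (i - 1) 0 + pvScoreA (PySem.List.pyGetD cs i 'a'))) p).length = cs.length ∧
     ∀ j, j < cs.length →
      ((PySem.List.pyRange (m : Int) (cs.length : Int) 1).foldl
      (fun p i => PySem.List.pySetD p i
        (PySem.List.pyGetD p (i - 1) 0 + pvScoreA (PySem.List.pyGetD cs i 'a'))) p).getD j 0 = pvPS cs (j + 1)) := by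
  intro fuel
  induction fuel with
  | zero =>
      intro m hf h1 h2 p hlen hp
      have hm : m = cs.length := by omega
      rw [hm, PySem.List.pyRange_one_eq_nil (by omega)]
      exact ⟨hlen, fun j hj => hp j (by omega)⟩
  | succ f ih =>
      intro m hf h1 h2 p hlen hp
      by_cases hlt : m < cs.length
      · rw [PySem.List.pyRange_one_cons (by exact_mod_cast hlt)]
        simp only [List.foldl_cons]
        have hstep : (PySem.List.pySetD p (m : Int)
            (PySem.List.pyGetD p ((m : Int) - 1) 0 + pvScoreA (PySem.List.pyGetD cs (m : Int) 'a')))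
            = p.set m (pvPS cs (m + 1)) := by
          have hm1 : (m : Int) - 1 = ((m - 1 : Nat) : Int) := by omega
          have hg1 : PySem.List.pyGetD p ((m : Int) - 1) 0 = p.getD (m - 1) 0 := by
            rw [hm1]; simp
          rw [hg1, PySem.List.pyGetD_ofNat cs m 'a' hlt, hp (m - 1) (by omega)]
          have hmm : m - 1 + 1 = m := by omega
          rw [hmm, ← pvPS_succ cs m hlt]
          simp
        rw [hstep]
        have hmi : ((m : Int) + 1) = (((m + 1 : Nat)) : Int) := by push_cast; ring
        rw [hmi]
        refine ih (m + 1) (by omega) (by omega) (by omega) _ (by simpa using hlen) ?_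
        intro j hj
        rw [pvGetDSet p m j _ (by omega)]
        rcases eq_or_ne j m with hjm | hjm
        · simp [hjm]
        · rw [if_neg hjm]
          exact hp j (by omega)
      · have hm : m = cs.length := by omega
        rw [hm, PySem.List.pyRange_one_eq_nil (by omega)]
        exact ⟨hlen, fun j hj => hp j (by omega)⟩

-- the suffix-array loop invariant (countdown loop, index m down to 0)
lemma suffix_inv (cs : List Char) :
    ∀ (m : Nat), m + 1 < cs.length →
    ∀ (q : List Int), q.length = cs.length →
    (∀ j, m < j → j < cs.length → q.getD j 0 = pvSS cs j) →
    (((PySem.List.pyRange (m : Int) (-1) (-1)).foldl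
      (fun q i => PySem.List.pySetD q i
        (PySem.List.pyGetD q (i + 1) 0 + pvScoreA (PySem.List.pyGetD cs i 'a'))) q).length = cs.length ∧
     ∀ j, j < cs.length →
      ((PySem.List.pyRange (m : Int) (-1) (-1)).foldl
      (fun q i => PySem.List.pySetD q i
        (PySem.List.pyGetD q (i + 1) 0 + pvScoreA (PySem.List.pyGetD cs i 'a'))) q).getD j 0 = pvSS cs j) := by
  intro m
  induction m with
  | zero =>
      intro hm q hlen hq
      simp only [Nat.cast_zero]
      rw [PySem.List.pyRange_neg_one_cons (by omega), PySem.List.pyRange_neg_one_eq_nil (by omega)]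
      simp only [List.foldl_cons, List.foldl_nil]
      have hg1 : PySem.List.pyGetD q ((0 : Int) + 1) 0 = q.getD 1 0 := by
        simpa using PySem.List.pyGetD_natCast q 1 0
      have hg2 : PySem.List.pyGetD cs (0 : Int) 'a' = cs[0]'(by omega) := by
        simpa using PySem.List.pyGetD_ofNat cs 0 'a' (by omega)
      have hstep : (PySem.List.pySetD q (0 : Int)
          (PySem.List.pyGetD q ((0 : Int) + 1) 0 + pvScoreA (PySem.List.pyGetD cs (0 : Int) 'a')))
          = q.set 0 (pvSS cs 0) := by
        rw [hg1, hg2, hq 1 (by omega) (by omega)]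
        have h0 : pvSS cs 1 + pvScoreA (cs[0]'(by omega)) = pvSS cs 0 := by
          rw [pvSS_succ cs 0 (by omega)]; ring
        rw [h0]
        simpa using PySem.List.pySetD_natCast q 0 (pvSS cs 0)
      rw [hstep]
      refine ⟨by simpa using hlen, fun j hj => ?_⟩
      rw [pvGetDSet q 0 j _ (by omega)]
      rcases eq_or_ne j 0 with hj0 | hj0
      · simp [hj0]
      · rw [if_neg hj0]
        exact hq j (by omega) hj
  | succ m ih =>
      intro hm q hlen hq
      rw [PySem.List.pyRange_neg_one_cons (by omega)]
      simp only [List.foldl_cons]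
      have hg1 : PySem.List.pyGetD q (((m + 1 : Nat) : Int) + 1) 0 = q.getD (m + 2) 0 := by
        rw [show (((m + 1 : Nat) : Int) + 1) = (((m + 2 : Nat)) : Int) by push_cast; ring]
        exact PySem.List.pyGetD_natCast q (m + 2) 0
      have hstep : (PySem.List.pySetD q (((m + 1 : Nat)) : Int)
          (PySem.List.pyGetD q (((m + 1 : Nat) : Int) + 1) 0 + pvScoreA (PySem.List.pyGetD cs (((m + 1 : Nat)) : Int) 'a')))
          = q.set (m + 1) (pvSS cs (m + 1)) := by
        rw [hg1, PySem.List.pyGetD_ofNat cs (m + 1) 'a' (by omega), hq (m + 2) (by omega) (by omega)]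
        have h0 : pvSS cs (m + 2) + pvScoreA (cs[m + 1]'(by omega)) = pvSS cs (m + 1) := by
          rw [pvSS_succ cs (m + 1) (by omega)]; ring
        rw [h0]
        simpa using PySem.List.pySetD_natCast q (m + 1) (pvSS cs (m + 1))
      rw [hstep]
      have hmi : (((m + 1 : Nat)) : Int) - 1 = (m : Int) := by push_cast; ring
      rw [hmi]
      refine ih (by omega) _ (by simpa using hlen) ?_
      intro j hjm hjn
      rw [pvGetDSet q (m + 1) j _ (by omega)]
      rcases eq_or_ne j (m + 1) with hje | hje
      · simp [hje]
      · rw [if_neg hje]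
        exact hq j (by omega) hjn

-- characterization of B's loop
lemma go_iff (total : Int) : ∀ (l : List Char) (pre : Int),
    scoreBalanceAltGo total pre l = true ↔
    ∃ k : Nat, k < l.length ∧ 2 * (pre + ((l.take (k + 1)).map pvScoreB).sum) = total := by
  intro l
  induction l with
  | nil => intro pre; simp [scoreBalanceAltGo]
  | cons c rest ih =>
      intro pre
      simp only [scoreBalanceAltGo]
      by_cases h : 2 * (pre + pvScoreB c) = total
      · simp only [h, beq_self_eq_true, if_true]
        constructor
        · intro _
          exact ⟨0, by simp, by simpa using h⟩
        · intro _; trivial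
      · have hb : (2 * (pre + pvScoreB c) == total) = false := beq_eq_false_iff_ne.mpr h
        rw [hb]
        simp only [Bool.false_eq_true, if_false, ih (pre + pvScoreB c)]
        constructor
        · rintro ⟨k, hk, he⟩
          exact ⟨k + 1, by simpa using hk, by
            simp only [List.take_succ_cons, List.map_cons, List.sum_cons] at he ⊢
            omega⟩
        · rintro ⟨k, hk, he⟩
          cases k with
          | zero => exact absurd (by simpa using he) h
          | succ k =>
              exact ⟨k, by simpa using hk, by
                simp only [List.take_succ_cons, List.map_cons, List.sum_cons] at he ⊢
                omega⟩

-- characterization of A (for nonempty s)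
lemma scoreBalance_iff (s : String) (hne : s.toList ≠ []) :
    scoreBalance s = true ↔
    ∃ k : Nat, k + 1 < s.toList.length ∧ pvPS s.toList (k + 1) = pvSS s.toList (k + 1) := by
  set cs := s.toList with hcs
  have hn : 1 ≤ cs.length := List.length_pos_of_ne_nil hne
  unfold scoreBalance
  rw [← hcs]
  simp only []
  -- initial prefix array
  have hpre0len : (PySem.List.pySetD (List.replicate cs.length (0 : Int)) 0
      (pvScoreA (PySem.List.pyGetD cs 0 'a'))).length = cs.length := by
    simp [PySem.List.length_pySetD]
  have hpre0 : ∀ j, j < 1 → (PySem.List.pySetD (List.replicate cs.length (0 : Int)) 0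
      (pvScoreA (PySem.List.pyGetD cs 0 'a'))).getD j 0 = pvPS cs (j + 1) := by
    intro j hj
    have hj0 : j = 0 := by omega
    subst hj0
    have h0 : PySem.List.pySetD (List.replicate cs.length (0 : Int)) (0 : Int)
        (pvScoreA (PySem.List.pyGetD cs 0 'a'))
        = (List.replicate cs.length (0 : Int)).set 0 (pvScoreA (cs[0]'(by omega))) := by
      rw [show PySem.List.pyGetD cs (0 : Int) 'a' = cs[0]'(by omega) from by
        simpa using PySem.List.pyGetD_ofNat cs 0 'a' (by omega)]
      simpa using PySem.List.pySetD_natCast (List.replicate cs.length (0 : Int)) 0 _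
    rw [h0, pvGetDSet _ 0 0 _ (by simpa using hn), if_pos rfl]
    have h1 := pvPS_succ cs 0 (by omega)
    simp [pvPS] at h1 ⊢
    simp [h1]
  have hpref := prefix_inv cs (cs.length - 1) 1 (by omega) (by omega) (by omega) _ hpre0len hpre0
  -- initial suffix array
  have hslen : (PySem.List.pySetD (List.replicate cs.length (0 : Int)) ((cs.length : Int) - 1)
      (pvScoreA (PySem.List.pyGetD cs ((cs.length : Int) - 1) 'a'))).length = cs.length := by
    simp [PySem.List.length_pySetD]
  have hlast : ((cs.length : Int) - 1) = (((cs.length - 1 : Nat)) : Int) := by omega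
  have hs0 : ∀ j, cs.length - 1 - 1 < j → j < cs.length →
      (PySem.List.pySetD (List.replicate cs.length (0 : Int)) ((cs.length : Int) - 1)
      (pvScoreA (PySem.List.pyGetD cs ((cs.length : Int) - 1) 'a'))).getD j 0 = pvSS cs j := by
    intro j hj1 hj2
    have hj : j = cs.length - 1 := by omega
    subst hj
    have h0 : PySem.List.pySetD (List.replicate cs.length (0 : Int)) ((cs.length : Int) - 1)
        (pvScoreA (PySem.List.pyGetD cs ((cs.length : Int) - 1) 'a'))
        = (List.replicate cs.length (0 : Int)).set (cs.length - 1) (pvScoreA (cs[cs.length - 1]'(by omega))) := by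
      rw [hlast, PySem.List.pyGetD_ofNat cs (cs.length - 1) 'a' (by omega)]
      exact PySem.List.pySetD_natCast (List.replicate cs.length (0 : Int)) (cs.length - 1) _
    rw [h0, pvGetDSet _ (cs.length - 1) (cs.length - 1) _ (by simp; omega), if_pos rfl]
    rw [pvSS_succ cs (cs.length - 1) (by omega)]
    have hz : pvSS cs (cs.length - 1 + 1) = 0 := by
      rw [pvSS, List.drop_eq_nil_of_le (by simp only [pvG, List.length_map]; omega)]
      rfl
    rw [hz]; ring
  -- evaluate the folds, splitting on length 1 vs >= 2
  by_cases h1 : cs.length = 1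
  · rw [show ((cs.length : Int) - 1) = 0 by omega]
    rw [PySem.List.pyRange_one_eq_nil (by omega)]
    simp only [List.any_nil]
    constructor
    · intro h; exact absurd h (by simp)
    · rintro ⟨k, hk, _⟩; omega
  · have h2 : 2 ≤ cs.length := by omega
    have hsuf := suffix_inv cs (cs.length - 2) (by omega) _ hslen
      (by intro j hja hjb; exact hs0 j (by omega) hjb)
    rw [show ((cs.length : Int) - 2) = (((cs.length - 2 : Nat)) : Int) by omega]
    simp only [Nat.cast_one] at hpref
    obtain ⟨hPlen, hP⟩ := hpref
    obtain ⟨hSlen, hS⟩ := hsuf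
    rw [List.any_eq_true]
    constructor
    · rintro ⟨i, hmem, hbeq⟩
      rw [PySem.List.mem_pyRange_one] at hmem
      obtain ⟨hi0, hi1⟩ := hmem
      set k := i.toNat with hk
      have hik : i = (k : Int) := by omega
      have hkn : k + 1 < cs.length := by omega
      refine ⟨k, hkn, ?_⟩
      rw [hik] at hbeq
      rw [PySem.List.pyGetD_natCast, show ((k : Int) + 1) = (((k + 1 : Nat)) : Int) by push_cast; ring,
        PySem.List.pyGetD_natCast] at hbeq
      have hb := eq_of_beq hbeq
      rw [hP k (by omega), hS (k + 1) hkn] at hb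
      exact hb
    · rintro ⟨k, hkn, he⟩
      refine ⟨(k : Int), ?_, ?_⟩
      · rw [PySem.List.mem_pyRange_one]; omega
      · rw [PySem.List.pyGetD_natCast, show ((k : Int) + 1) = (((k + 1 : Nat)) : Int) by push_cast; ring,
          PySem.List.pyGetD_natCast, hP k (by omega), hS (k + 1) hkn]
        simpa using he

-- characterization of B
lemma scoreBalance_alt_iff (s : String) :
    scoreBalance_alt s = true ↔
    ∃ k : Nat, k + 1 < s.toList.length ∧ pvPS s.toList (k + 1) = pvSS s.toList (k + 1) := by
  set cs := s.toList with hcs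
  unfold scoreBalance_alt
  rw [← hcs]
  simp only [PySem.List.slice_to_neg_one]
  rw [go_iff]
  have hdl : cs.dropLast.length = cs.length - 1 := by simp
  have hkey : ∀ k : Nat, k + 1 < cs.length →
      (2 * (0 + ((cs.dropLast.take (k + 1)).map pvScoreB).sum) = (cs.map pvScoreB).sum
        ↔ pvPS cs (k + 1) = pvSS cs (k + 1)) := by
    intro k hk
    have ht : cs.dropLast.take (k + 1) = cs.take (k + 1) := by
      rw [List.dropLast_eq_take, List.take_take]
      congr 1; omega
    rw [ht, pvScoreB_eq_A]
    have htake : (List.map pvScoreA (cs.take (k + 1))).sum = pvPS cs (k + 1) := by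
      simp [pvPS, pvG, List.map_take]
    have htot : (cs.map pvScoreA).sum = pvPS cs (k + 1) + pvSS cs (k + 1) :=
      (pvPS_add_SS cs (k + 1)).symm
    rw [htake, htot]
    omega
  constructor
  · rintro ⟨k, hk, he⟩
    rw [hdl] at hk
    have hk' : k + 1 < cs.length := by omega
    exact ⟨k, hk', (hkey k hk').mp he⟩
  · rintro ⟨k, hk, he⟩
    exact ⟨k, by rw [hdl]; omega, (hkey k hk).mpr he⟩

-- ===== VERDICT (by name: the statement is the Claim_ definition above) =====
theorem scoreBalance_spec : Claim_equal_scoreBalance := by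
  intro s _ hpre
  unfold Spec_scoreBalance
  have hne : s.toList ≠ [] := by
    intro h
    exact hpre (by rw [← String.ofList_toList (s := s), h])
  have hA := scoreBalance_iff s hne
  have hB := scoreBalance_alt_iff s
  by_cases h : scoreBalance s = true
  · rw [h, Eq.comm, hB, ← hA]; exact h
  · have hAf : scoreBalance s = false := by revert h; cases scoreBalance s <;> simp
    have hBf : scoreBalance_alt s = false := by
      by_contra hb
      have hbt : scoreBalance_alt s = true := by revert hb; cases scoreBalance_alt s <;> simp
      exact h (hA.mpr (hB.mp hbt))
    rw [hAf, hBf]
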